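-- pv_equiv track=rewrite | github.com/ParsaSoroush/projects | 105_index_words.py | find_proper_nouns
-- ===== SOURCE A (Python) =====
-- def find_proper_nouns(text):
--     sentences = text.replace(',', '.').split('.')
--     proper_nouns = []
--     word_count = 0
--
--     for sentence in sentences:
--         sentence = sentence.strip()
--         if sentence:
--             words = sentence.split()
--             for i, word in enumerate(words[1:], 2):
--                 word = word.rstrip('.').rstrip(',')
--                 if word and word[0].isupper() and not word.isdigit():
--                     proper_nouns.append(f'{word_count + i}:{word}')
--             word_count += len(words)
--
--     if not proper_nouns:
--         return 'None'
--     return '\n'.join(proper_nouns)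
-- ===== SOURCE B (Python) =====
-- def find_proper_nouns(text):
--     # Single character-level scan (state machine): no replace/split pipeline.
--     # pos = global 1-based word index (words of empty sentences don't exist, so
--     # it equals A's word_count + i arithmetic); 'first' marks a sentence start.
--     out = []
--     pos = 0
--     buf = ''
--     first = True
--
--     def flush(buf, first):
--         if buf:
--             if not first and 'A' <= buf[0] <= 'Z' and not buf.isdigit():
--                 out.append('%d:%s' % (pos, buf))
--             return '', False
--         return '', first
--
--     for ch in text:
--         if ch == '.' or ch == ',':
--             buf, first = flush(buf, first)
--             first = True
--         elif ch.isspace():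
--             buf, first = flush(buf, first)
--         else:
--             if not buf:
--                 pos += 1
--             buf += ch
--     flush(buf, first)
--     return '\n'.join(out) if out else 'None'
-- ===== Notes on version B (the rewrite author's own statement) =====
-- stated objective: alternative
-- what changed: B replaces A's replace/split/strip/split string pipeline with nested per-sentence loops by a single character-level state machine that scans the text once, flushing the pending word at sentence separators and whitespace while tracking the global word index and a sentence-start flag.
import Mathlib
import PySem

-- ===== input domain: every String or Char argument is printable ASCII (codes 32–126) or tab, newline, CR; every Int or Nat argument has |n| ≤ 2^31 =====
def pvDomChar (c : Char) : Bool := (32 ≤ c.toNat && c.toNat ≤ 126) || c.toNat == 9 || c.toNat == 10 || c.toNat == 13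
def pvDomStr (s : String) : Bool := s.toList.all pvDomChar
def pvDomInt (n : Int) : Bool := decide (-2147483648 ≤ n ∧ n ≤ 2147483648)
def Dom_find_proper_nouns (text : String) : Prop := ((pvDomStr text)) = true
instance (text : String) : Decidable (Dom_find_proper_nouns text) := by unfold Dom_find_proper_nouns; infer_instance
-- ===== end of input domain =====

-- B replaces A's replace/split/strip/split string pipeline by a single character-level
-- state machine (objective: alternative — one pass over the characters, same cost class).

-- ===== PORT A =====
-- exact port of str.rstrip(chars) for a one-character chars set
def pvRstripCh (cs : List Char) (ch : Char) : List Char :=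
  (cs.reverse.dropWhile (fun c => c == ch)).reverse

-- loop body of A's inner 'for i, word in enumerate(words[1:], 2)' (wc = word_count)
def pvInnerA (wc : Int) (q : List (List Char) × Int) (word : List Char) :
    List (List Char) × Int :=
  let word := pvRstripCh (pvRstripCh word '.') ','
  (( match word with
     | [] => q.1
     | c :: _ =>
       if PySem.Chars.isupper c && !(PySem.Chars.strIsdigit word)
       then q.1 ++ [PySem.Int.toChars (wc + q.2) ++ ':' :: word] else q.1),
   q.2 + 1)

-- loop body of A's outer 'for sentence in sentences' (state = (proper_nouns, word_count))
def pvOuterA (st : List (List Char) × Int) (sentence : List Char) :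
    List (List Char) × Int :=
  let sentence := PySem.Chars.strip sentence
  if sentence ≠ [] then
    let words := PySem.Chars.split₀ sentence
    let inner := (words.drop 1).foldl (pvInnerA st.2) (st.1, 2)
    (inner.1, st.2 + (words.length : Int))
  else st

def find_proper_nouns (text : String) : String :=
  let sentences := PySem.Chars.splitOn (PySem.Chars.replace text.toList [','] ['.']) ['.']
  let st := sentences.foldl pvOuterA ([], 0)
  if st.1 = [] then "None" else String.mk (PySem.Chars.join ['\n'] st.1)

-- ===== PORT B =====
-- Source B's flush(buf, first): emit the pending word (global index pos) unless it opens a sentence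
def pvFlush (out : List (List Char)) (pos : Int) (buf : List Char) (first : Bool) :
    List (List Char) × List Char × Bool :=
  if buf ≠ [] then
    ((match buf with
      | [] => out
      | c :: _ =>
        if !first && ('A' ≤ c && c ≤ 'Z') && !(PySem.Chars.strIsdigit buf)
        then out ++ [PySem.Int.toChars pos ++ ':' :: buf] else out),
     [], false)
  else (out, buf, first)

-- Source B's per-character step; state = (out, pos, buf, first)
def pvStepB (st : List (List Char) × Int × List Char × Bool) (ch : Char) :
    List (List Char) × Int × List Char × Bool :=
  let (out, pos, buf, first) := st
  if ch == '.' || ch == ',' then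
    let (out, buf, _) := pvFlush out pos buf first
    (out, pos, buf, true)
  else if PySem.Chars.isspace ch then
    let (out, buf, first) := pvFlush out pos buf first
    (out, pos, buf, first)
  else
    let pos := if buf.isEmpty then pos + 1 else pos
    (out, pos, buf ++ [ch], first)

def find_proper_nouns_alt (text : String) : String :=
  let st := text.toList.foldl pvStepB ([], 0, [], true)
  let (out, pos, buf, first) := st
  let (out, _, _) := pvFlush out pos buf first
  if out ≠ [] then String.mk (PySem.Chars.join ['\n'] out) else "None"

-- ===== PRECONDITION & SPEC =====
def Spec_find_proper_nouns (text : String) (out : String) : Prop := out = find_proper_nouns_alt text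
instance (text : String) (out : String) : Decidable (Spec_find_proper_nouns text out) := by
  unfold Spec_find_proper_nouns; infer_instance

-- ===== CLAIM (what is proved, stated in full; the proofs are below) =====
def Claim_equal_find_proper_nouns : Prop := ∀ (text : String), Dom_find_proper_nouns text → Spec_find_proper_nouns text (find_proper_nouns text)

-- ===== LEMMAS AND PROOFS =====

-- the substitution text.replace(',', '.') performs
def pvSub (c : Char) : Char := if c = ',' then '.' else c

-- split on '.', keeping empty segments, with pending sentence prefix `pre`
def pvSplitDot : List Char → List Char → List (List Char)
  | pre, [] => [pre]
  | pre, c :: t => if c = '.' then pre :: pvSplitDot [] t else pvSplitDot (pre ++ [c]) t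

-- whitespace word split (Python str.split()), with pending word `cur`
def pvSplitW : List Char → List Char → List (List Char)
  | cur, [] => if cur = [] then [] else [cur]
  | cur, c :: t =>
    if PySem.Chars.isspace c then
      (if cur = [] then pvSplitW [] t else cur :: pvSplitW [] t)
    else pvSplitW (cur ++ [c]) t

-- tag each word with an "opens its sentence" flag
def pvFlag : Bool → List (List Char) → List (List Char × Bool)
  | _, [] => []
  | first, w :: ws => (w, first) :: pvFlag false ws

def pvWtoks (ss : List (List Char)) : List (List Char × Bool) :=
  ss.flatMap (fun s => pvFlag true (pvSplitW [] s))

-- token stream of the raw text, with pending word buf / sentence-start flag first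
def pvTok : List Char → List Char → Bool → List (List Char × Bool)
  | [], buf, first => if buf = [] then [] else [(buf, first)]
  | c :: t, buf, first =>
    if c = '.' ∨ c = ',' then
      (if buf = [] then pvTok t [] true else (buf, first) :: pvTok t [] true)
    else if PySem.Chars.isspace c then
      (if buf = [] then pvTok t [] first else (buf, first) :: pvTok t [] false)
    else pvTok t (buf ++ [c]) first

def pvCond (w : List Char) : Bool :=
  match w with
  | [] => false
  | c :: _ => PySem.Chars.isupper c && !(PySem.Chars.strIsdigit w)

-- select and format the tokens; p = number of words before the list
def pvPick : Int → List (List Char × Bool) → List (List Char)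
  | _, [] => []
  | p, (w, f) :: ts =>
    (if !f && pvCond w then [PySem.Int.toChars (p + 1) ++ ':' :: w] else []) ++ pvPick (p + 1) ts

-- output of B's machine after the trailing flush
def pvEndOut (st : List (List Char) × Int × List Char × Bool) : List (List Char) :=
  (pvFlush st.1 st.2.1 st.2.2.1 st.2.2.2).1

-- ---- library-function characterizations ----
theorem replace_go_eq (l : List Char) : ∀ (fuel : Nat) (acc : List Char), l.length ≤ fuel →
    PySem.Chars.replace.go [','] ['.'] fuel l acc = acc.reverse ++ l.map pvSub := by
  induction l with
  | nil =>
    intro fuel acc _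
    cases fuel <;> simp [PySem.Chars.replace.go]
  | cons c t ih =>
    intro fuel acc h
    cases fuel with
    | zero => simp at h
    | succ n =>
      simp only [PySem.Chars.replace.go]
      by_cases hc : c = ','
      · subst hc
        simp [List.isPrefixOf, ih n _ (by simpa using h), pvSub]
      · have : List.isPrefixOf [','] (c :: t) = false := by
          simp [List.isPrefixOf]; intro h'; exact absurd h'.symm hc
        simp [this, ih n _ (by simpa using h), pvSub, hc]

theorem replace_eq (l : List Char) :
    PySem.Chars.replace l [','] ['.'] = l.map pvSub := by
  have h := replace_go_eq l l.length [] le_rfl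
  simpa [PySem.Chars.replace] using h

theorem splitOn_go_eq (l : List Char) :
    ∀ (fuel : Nat) (cur : List Char) (acc : List (List Char)), l.length ≤ fuel →
    PySem.Chars.splitOn.go ['.'] fuel l cur acc = acc.reverse ++ pvSplitDot cur.reverse l := by
  induction l with
  | nil =>
    intro fuel cur acc _
    cases fuel <;> simp [PySem.Chars.splitOn.go, pvSplitDot]
  | cons c t ih =>
    intro fuel cur acc h
    cases fuel with
    | zero => simp at h
    | succ n =>
      simp only [PySem.Chars.splitOn.go]
      by_cases hc : c = '.'
      · subst hc
        simp [List.isPrefixOf, ih n _ _ (by simpa using h), pvSplitDot]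
      · have : List.isPrefixOf ['.'] (c :: t) = false := by
          simp [List.isPrefixOf]; intro h'; exact absurd h'.symm hc
        simp [this, ih n _ _ (by simpa using h), pvSplitDot, hc]

theorem splitOn_eq (l : List Char) :
    PySem.Chars.splitOn l ['.'] = pvSplitDot [] l := by
  have h := splitOn_go_eq l (l.length + 1) [] [] (by omega)
  simpa [PySem.Chars.splitOn] using h

theorem split₀_go_eq (l : List Char) : ∀ (cur : List Char) (acc : List (List Char)),
    PySem.Chars.split₀.go l cur acc = acc.reverse ++ pvSplitW cur.reverse l := by
  induction l with
  | nil => intro cur acc; by_cases hc : cur = [] <;> simp [PySem.Chars.split₀.go, pvSplitW, hc]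
  | cons c t ih =>
    intro cur acc
    by_cases hs : PySem.Chars.isspace c
    · by_cases hc : cur = [] <;>
        simp [PySem.Chars.split₀.go, hs, hc, ih, pvSplitW]
    · simp [PySem.Chars.split₀.go, hs, ih, pvSplitW]

theorem split₀_eq (l : List Char) :
    PySem.Chars.split₀ l = pvSplitW [] l := by
  have h := split₀_go_eq l [] []
  simpa [PySem.Chars.split₀] using h

theorem splitW_all_space (ws : List Char) : ∀ (cur : List Char),
    (∀ c ∈ ws, PySem.Chars.isspace c = true) →
    pvSplitW cur ws = if cur = [] then [] else [cur] := by
  induction ws with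
  | nil => intro cur _; simp [pvSplitW]
  | cons c t ih =>
    intro cur h
    have hc := h c (by simp)
    by_cases hcur : cur = [] <;>
      simp [pvSplitW, hc, hcur, ih [] (fun x hx => h x (by simp [hx]))]

theorem splitW_append_space (l : List Char) : ∀ (cur ws : List Char),
    (∀ c ∈ ws, PySem.Chars.isspace c = true) →
    pvSplitW cur (l ++ ws) = pvSplitW cur l := by
  induction l with
  | nil =>
    intro cur ws h
    simp only [List.nil_append]
    rw [splitW_all_space ws cur h]; simp [pvSplitW]
  | cons c t ih =>
    intro cur ws h
    by_cases hs : PySem.Chars.isspace c <;> by_cases hcur : cur = [] <;>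
      simp [pvSplitW, hs, hcur, ih _ _ h]

theorem splitW_lstrip (s : List Char) :
    pvSplitW [] (List.dropWhile PySem.Chars.isspace s) = pvSplitW [] s := by
  induction s with
  | nil => simp
  | cons c t ih =>
    by_cases hs : PySem.Chars.isspace c <;> simp [List.dropWhile, hs, pvSplitW, ih]

theorem splitW_strip (s : List Char) :
    pvSplitW [] (PySem.Chars.strip s) = pvSplitW [] s := by
  have h1 : PySem.Chars.strip s = PySem.Chars.rstrip (PySem.Chars.lstrip s) := rfl
  set u := PySem.Chars.lstrip s with hu
  have hsplit : u = PySem.Chars.rstrip u ++ (List.takeWhile PySem.Chars.isspace u.reverse).reverse := by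
    simp only [PySem.Chars.rstrip]
    rw [← List.reverse_append, List.takeWhile_append_dropWhile, List.reverse_reverse]
  have hws : ∀ c ∈ (List.takeWhile PySem.Chars.isspace u.reverse).reverse, PySem.Chars.isspace c = true := by
    intro c hc
    exact List.mem_takeWhile_imp (List.mem_reverse.mp hc)
  calc pvSplitW [] (PySem.Chars.strip s)
      = pvSplitW [] (PySem.Chars.rstrip u) := by rw [h1]
    _ = pvSplitW [] (PySem.Chars.rstrip u ++ (List.takeWhile PySem.Chars.isspace u.reverse).reverse) :=
        (splitW_append_space _ _ _ hws).symm
    _ = pvSplitW [] u := by rw [← hsplit]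
    _ = pvSplitW [] s := splitW_lstrip s

theorem splitDot_ne_nil (l : List Char) : ∀ (pre : List Char), pvSplitDot pre l ≠ [] := by
  induction l with
  | nil => intro pre; simp [pvSplitDot]
  | cons c t ih => intro pre; by_cases hc : c = '.' <;> simp [pvSplitDot, hc, ih]

theorem splitDot_pre (l : List Char) : ∀ (pre : List Char),
    pvSplitDot pre l = (pre ++ (pvSplitDot [] l).headD []) :: (pvSplitDot [] l).tail := by
  induction l with
  | nil => intro pre; simp [pvSplitDot]
  | cons c t ih =>
    intro pre
    by_cases hc : c = '.'
    · simp [pvSplitDot, hc]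
    · simp only [pvSplitDot, hc, if_false]
      rw [ih (pre ++ [c]), ih ([] ++ [c])]
      simp

theorem splitDot_chars (l : List Char) : ∀ (pre s : List Char), s ∈ pvSplitDot pre l →
    ∀ ch ∈ s, ch ∈ pre ∨ (ch ∈ l ∧ ch ≠ '.') := by
  induction l with
  | nil => intro pre s hs ch hch; simp [pvSplitDot] at hs; subst hs; exact Or.inl hch
  | cons c t ih =>
    intro pre s hs ch hch
    by_cases hc : c = '.'
    · subst hc
      simp [pvSplitDot] at hs
      rcases hs with h | h
      · subst h; exact Or.inl hch
      · rcases ih [] s h ch hch with h' | ⟨h1, h2⟩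
        · simp at h'
        · exact Or.inr ⟨by simp [h1], h2⟩
    · simp only [pvSplitDot, hc, if_false] at hs
      rcases ih (pre ++ [c]) s hs ch hch with h' | ⟨h1, h2⟩
      · rcases List.mem_append.mp h' with h'' | h''
        · exact Or.inl h''
        · simp at h''; subst h''
          exact Or.inr ⟨by simp, by simpa [eq_comm] using hc⟩
      · exact Or.inr ⟨by simp [h1], h2⟩

theorem splitW_chars (l : List Char) : ∀ (cur w : List Char), w ∈ pvSplitW cur l →
    ∀ ch ∈ w, ch ∈ cur ∨ ch ∈ l := by
  induction l with
  | nil =>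
    intro cur w hw ch hch
    by_cases hc : cur = [] <;> simp [pvSplitW, hc] at hw
    subst hw; exact Or.inl hch
  | cons c t ih =>
    intro cur w hw ch hch
    by_cases hs : PySem.Chars.isspace c
    · by_cases hc : cur = [] <;>
        simp only [pvSplitW, hs, hc, if_true, if_false, ite_true, ite_false] at hw
      · rcases ih [] w hw ch hch with h | h
        · simp at h
        · exact Or.inr (by simp [h])
      · rcases List.mem_cons.mp hw with h | h
        · subst h; exact Or.inl hch
        · rcases ih [] w h ch hch with h' | h'
          · simp at h'
          · exact Or.inr (by simp [h'])
    · simp only [pvSplitW, hs, if_false, ite_false] at hw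
      rcases ih (cur ++ [c]) w hw ch hch with h | h
      · rcases List.mem_append.mp h with h' | h'
        · exact Or.inl h'
        · simp at h'; subst h'; exact Or.inr (by simp)
      · exact Or.inr (by simp [h])

theorem rstripCh_id (w : List Char) (ch : Char) (h : ch ∉ w) : pvRstripCh w ch = w := by
  unfold pvRstripCh
  rw [List.dropWhile_eq_self_iff.mpr, List.reverse_reverse]
  intro hne
  simp only [beq_iff_eq]
  intro heq
  exact h (by rw [← heq]; exact List.mem_reverse.mp (List.getElem_mem hne))

-- ---- the token-stream bridge ----
theorem tok_eq_wtoks (cs : List Char) : ∀ (buf : List Char) (first : Bool),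
    pvTok cs buf first =
      pvFlag first (pvSplitW buf ((pvSplitDot [] (cs.map pvSub)).headD []))
        ++ pvWtoks (pvSplitDot [] (cs.map pvSub)).tail := by
  induction cs with
  | nil =>
    intro buf first
    by_cases hb : buf = [] <;> simp [pvTok, pvSplitDot, pvSplitW, pvWtoks, pvFlag, hb]
  | cons c t ih =>
    intro buf first
    obtain ⟨h, tl, hS⟩ : ∃ h tl, pvSplitDot [] (t.map pvSub) = h :: tl := by
      rcases e : pvSplitDot [] (t.map pvSub) with _ | ⟨h, tl⟩
      · exact absurd e (splitDot_ne_nil _ _)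
      · exact ⟨h, tl, rfl⟩
    by_cases hdot : c = '.' ∨ c = ','
    · have hsub : pvSub c = '.' := by rcases hdot with h' | h' <;> simp [pvSub, h']
      have hmap : (c :: t).map pvSub = '.' :: t.map pvSub := by simp [hsub]
      rw [hmap]
      have hsd : pvSplitDot [] ('.' :: t.map pvSub) = [] :: pvSplitDot [] (t.map pvSub) := by
        simp [pvSplitDot]
      rw [hsd, hS]
      by_cases hb : buf = []
      · subst hb
        simp only [pvTok, hdot, if_pos, ite_true]
        rw [ih [] true, hS]
        simp [pvWtoks, pvSplitW, pvFlag]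
      · simp only [pvTok, hdot, if_pos, hb, if_neg, ite_false]
        rw [ih [] true, hS]
        simp [pvWtoks, pvSplitW, pvFlag, hb]
    · have hsub : pvSub c = c := by
        have : c ≠ ',' := fun h' => hdot (Or.inr h')
        simp [pvSub, this]
      have hcdot : c ≠ '.' := fun h' => hdot (Or.inl h')
      have hmap : (c :: t).map pvSub = c :: t.map pvSub := by simp [hsub]
      rw [hmap]
      have hsd : pvSplitDot [] (c :: t.map pvSub) = (c :: h) :: tl := by
        simp only [pvSplitDot, hcdot, if_false]
        rw [splitDot_pre _ ([] ++ [c]), hS]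
        simp
      rw [hsd]
      by_cases hs : PySem.Chars.isspace c
      · by_cases hb : buf = []
        · subst hb
          simp only [pvTok, hdot, hs, if_true, if_false, ite_true, ite_false, if_pos, if_neg]
          rw [ih [] first, hS]
          simp [pvSplitW, hs]
        · simp only [pvTok, hdot, hs, ite_true, ite_false, if_neg, hb, if_pos]
          rw [ih [] false, hS]
          simp only [List.headD_cons, List.tail_cons]
          have : pvSplitW buf (c :: h) = buf :: pvSplitW [] h := by
            simp [pvSplitW, hs, hb]
          rw [this]
          simp [pvFlag]
      · simp only [pvTok, hdot, hs, ite_false, if_neg]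
        rw [ih (buf ++ [c]) first, hS]
        simp only [List.headD_cons, List.tail_cons]
        have : pvSplitW buf (c :: h) = pvSplitW (buf ++ [c]) h := by
          simp [pvSplitW, hs]
        rw [this]
        simp

theorem flag_length (ws : List (List Char)) : ∀ b, (pvFlag b ws).length = ws.length := by
  induction ws with
  | nil => intro b; simp [pvFlag]
  | cons w t ih => intro b; simp [pvFlag, ih]

theorem pick_append (xs ys : List (List Char × Bool)) : ∀ (p : Int),
    pvPick p (xs ++ ys) = pvPick p xs ++ pvPick (p + xs.length) ys := by
  induction xs with
  | nil => intro p; simp [pvPick]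
  | cons x t ih =>
    intro p
    obtain ⟨w, f⟩ := x
    simp only [List.cons_append, pvPick, ih (p + 1), List.append_assoc, List.length_cons]
    have h : p + 1 + (t.length : Int) = p + ((t.length : Int) + 1) := by ring
    rw [h]
    push_cast
    ring_nf

theorem pick_flag_true (ws : List (List Char)) (p : Int) :
    pvPick p (pvFlag true ws) = pvPick (p + 1) (pvFlag false (ws.drop 1)) := by
  cases ws with
  | nil => simp [pvFlag, pvPick]
  | cons w t => simp [pvFlag, pvPick]

-- ---- A's folds compute pvPick over pvWtoks ----
theorem innerA_eq (rest : List (List Char)) : ∀ (pns : List (List Char)) (i wc : Int),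
    (∀ w ∈ rest, '.' ∉ w ∧ ',' ∉ w) →
    rest.foldl (pvInnerA wc) (pns, i) =
      (pns ++ pvPick (wc + i - 1) (pvFlag false rest), i + rest.length) := by
  induction rest with
  | nil => intro pns i wc _; simp [pvFlag, pvPick]
  | cons w ws ih =>
    intro pns i wc h
    obtain ⟨hd, hc⟩ := h w (by simp)
    have hw : pvRstripCh (pvRstripCh w '.') ',' = w := by
      rw [rstripCh_id w '.' hd, rstripCh_id w ',' hc]
    have hstep : pvInnerA wc (pns, i) w =
        (pns ++ (if pvCond w then [PySem.Int.toChars (wc + i) ++ ':' :: w] else []), i + 1) := by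
      simp only [pvInnerA, hw]
      cases w with
      | nil => simp [pvCond]
      | cons c cw =>
        simp only [pvCond]
        split_ifs <;> simp
    simp only [List.foldl_cons, hstep]
    rw [ih _ _ _ (fun x hx => h x (by simp [hx]))]
    simp only [pvFlag, pvPick, Bool.not_false, Bool.true_and, List.append_assoc, List.length_cons,
      Prod.mk.injEq]
    have h1 : wc + i - 1 + 1 = wc + i := by ring
    have h2 : wc + (i + 1) - 1 = wc + i := by ring
    rw [h1, h2]
    exact ⟨rfl, by push_cast; ring⟩

theorem outerA_eq (ss : List (List Char)) : ∀ (acc : List (List Char)) (wc : Int),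
    (∀ s ∈ ss, ∀ ch ∈ s, ch ≠ '.' ∧ ch ≠ ',') →
    ss.foldl pvOuterA (acc, wc) =
      (acc ++ pvPick wc (pvWtoks ss), wc + ((pvWtoks ss).length : Int)) := by
  induction ss with
  | nil => intro acc wc _; simp [pvWtoks, pvPick]
  | cons s ss ih =>
    intro acc wc h
    have hs := h s (by simp)
    have hwords : PySem.Chars.split₀ (PySem.Chars.strip s) = pvSplitW [] s := by
      rw [split₀_eq, splitW_strip]
    have hfree : ∀ w ∈ (pvSplitW [] s).drop 1, '.' ∉ w ∧ ',' ∉ w := by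
      intro w hw
      have hw' : w ∈ pvSplitW [] s := List.mem_of_mem_drop hw
      constructor <;> intro hch
      · rcases splitW_chars s [] w hw' _ hch with h' | h'
        · simp at h'
        · exact (hs _ h').1 rfl
      · rcases splitW_chars s [] w hw' _ hch with h' | h'
        · simp at h'
        · exact (hs _ h').2 rfl
    have hstep : pvOuterA (acc, wc) s =
        (acc ++ pvPick wc (pvFlag true (pvSplitW [] s)),
         wc + ((pvSplitW [] s).length : Int)) := by
      by_cases hstrip : PySem.Chars.strip s = []
      · have hws : pvSplitW [] s = [] := by
          rw [← splitW_strip, hstrip]; simp [pvSplitW]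
        simp [pvOuterA, hstrip, hws, pvFlag, pvPick]
      · simp only [pvOuterA, ne_eq, hstrip, not_false_eq_true, if_pos, ite_true, hwords]
        rw [innerA_eq _ _ _ _ hfree]
        rw [pick_flag_true]
        have h21 : wc + 2 - 1 = wc + 1 := by ring
        rw [h21]
    simp only [List.foldl_cons, hstep]
    rw [ih _ _ (fun x hx => h x (by simp [hx]))]
    have hwt : pvWtoks (s :: ss) = pvFlag true (pvSplitW [] s) ++ pvWtoks ss := by
      simp [pvWtoks]
    rw [hwt, pick_append, flag_length]
    simp only [Prod.mk.injEq, List.append_assoc, List.length_append, flag_length, true_and]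
    push_cast
    ring

-- ---- B's machine computes pvPick over pvTok ----
theorem flush_cons_fst (out : List (List Char)) (pos : Int) (c : Char) (bw : List Char)
    (first : Bool) :
    (pvFlush out pos (c :: bw) first).1 =
      out ++ (if !first && pvCond (c :: bw) then [PySem.Int.toChars pos ++ ':' :: c :: bw]
              else []) := by
  simp only [pvFlush, pvCond, ne_eq, reduceCtorEq, not_false_eq_true, if_pos, ite_true,
    PySem.Chars.isupper]
  split_ifs <;> simp_all <;> tauto

theorem flush_cons_pair (out : List (List Char)) (pos : Int) (c : Char) (bw : List Char)
    (first : Bool) :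
    pvFlush out pos (c :: bw) first = ((pvFlush out pos (c :: bw) first).1, [], false) := by
  simp [pvFlush]

theorem machineB_eq (cs : List Char) :
    ∀ (out : List (List Char)) (pos : Int) (buf : List Char) (first : Bool),
    pvEndOut (cs.foldl pvStepB (out, pos, buf, first)) =
      out ++ pvPick (if buf = [] then pos else pos - 1) (pvTok cs buf first) := by
  induction cs with
  | nil =>
    intro out pos buf first
    cases buf with
    | nil => simp [pvEndOut, pvFlush, pvTok, pvPick]
    | cons c bw =>
      simp only [List.foldl_nil, pvEndOut, pvTok, pvPick, reduceCtorEq, ite_false, if_neg]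
      rw [flush_cons_fst]
      have h1 : pos - 1 + 1 = pos := by ring
      simp [h1]
  | cons ch t ih =>
    intro out pos buf first
    simp only [List.foldl_cons]
    by_cases hdot : ch = '.' ∨ ch = ','
    · have hb : (ch == '.' || ch == ',') = true := by
        rcases hdot with h' | h' <;> simp [h']
      cases buf with
      | nil =>
        have hstep : pvStepB (out, pos, [], first) ch = (out, pos, [], true) := by
          simp [pvStepB, hb, pvFlush]
        rw [hstep, ih]
        simp [pvTok, hdot, pvPick]
      | cons c bw =>
        have hstep : pvStepB (out, pos, c :: bw, first) ch =
            ((pvFlush out pos (c :: bw) first).1, pos, [], true) := by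
          simp only [pvStepB, hb]
          rw [flush_cons_pair]
          simp
        rw [hstep, ih, flush_cons_fst]
        simp only [pvTok, hdot, if_pos, ite_true, reduceCtorEq, ite_false, if_neg, pvPick]
        have h1 : pos - 1 + 1 = pos := by ring
        rw [h1]
        simp [List.append_assoc]
    · by_cases hsp : PySem.Chars.isspace ch
      · have hb : (ch == '.' || ch == ',') = false := by
          push_neg at hdot
          simp [hdot.1, hdot.2]
        cases buf with
        | nil =>
          have hstep : pvStepB (out, pos, [], first) ch = (out, pos, [], first) := by
            simp [pvStepB, hb, hsp, pvFlush]
          rw [hstep, ih]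
          simp [pvTok, hdot, hsp, pvPick]
        | cons c bw =>
          have hstep : pvStepB (out, pos, c :: bw, first) ch =
              ((pvFlush out pos (c :: bw) first).1, pos, [], false) := by
            simp only [pvStepB, hb, hsp]
            rw [flush_cons_pair]
            simp
          rw [hstep, ih, flush_cons_fst]
          simp only [pvTok, hdot, hsp, ite_true, ite_false, reduceCtorEq, if_neg, if_pos, pvPick]
          have h1 : pos - 1 + 1 = pos := by ring
          rw [h1]
          simp [List.append_assoc]
      · have hb : (ch == '.' || ch == ',') = false := by
          push_neg at hdot
          simp [hdot.1, hdot.2]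
        cases buf with
        | nil =>
          have hstep : pvStepB (out, pos, [], first) ch = (out, pos + 1, [ch], first) := by
            simp [pvStepB, hb, hsp]
          rw [hstep, ih]
          simp [pvTok, hdot, hsp, pvPick]
        | cons c bw =>
          have hstep : pvStepB (out, pos, c :: bw, first) ch =
              (out, pos, c :: bw ++ [ch], first) := by
            simp [pvStepB, hb, hsp]
          rw [hstep, ih]
          simp [pvTok, hdot, hsp]

-- B's port, written with pvEndOut
theorem altB_endOut (text : String) :
    find_proper_nouns_alt text =
      (if pvEndOut (text.toList.foldl pvStepB ([], 0, [], true)) = [] then "None"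
       else String.mk (PySem.Chars.join ['\n']
              (pvEndOut (text.toList.foldl pvStepB ([], 0, [], true))))) := by
  unfold find_proper_nouns_alt pvEndOut
  rcases text.toList.foldl pvStepB ([], 0, [], true) with ⟨o, p, b, f⟩
  rcases hf : pvFlush o p b f with ⟨o2, b2, f2⟩
  by_cases h2 : o2 = [] <;> simp [hf, h2]

-- ===== VERDICT (by name: the statement is the Claim_ definition above) =====
theorem find_proper_nouns_spec : Claim_equal_find_proper_nouns := by
  intro text _
  unfold Spec_find_proper_nouns
  obtain ⟨h, tl, hS⟩ :
      ∃ h tl, pvSplitDot [] (text.toList.map pvSub) = h :: tl := by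
    rcases e : pvSplitDot [] (text.toList.map pvSub) with _ | ⟨h, tl⟩
    · exact absurd e (splitDot_ne_nil _ _)
    · exact ⟨h, tl, rfl⟩
  have hfree : ∀ s ∈ pvSplitDot [] (text.toList.map pvSub), ∀ ch ∈ s, ch ≠ '.' ∧ ch ≠ ',' := by
    intro s hs ch hch
    rcases splitDot_chars _ _ _ hs ch hch with h' | ⟨h1, h2⟩
    · simp at h'
    · refine ⟨h2, ?_⟩
      intro hcomma
      subst hcomma
      obtain ⟨c, _, hc2⟩ := List.mem_map.mp h1
      by_cases e : c = ','
      · rw [e] at hc2; simp [pvSub] at hc2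
      · simp [pvSub, e] at hc2
  have hA : find_proper_nouns text =
      (if pvPick 0 (pvWtoks (pvSplitDot [] (text.toList.map pvSub))) = [] then "None"
       else String.mk (PySem.Chars.join ['\n']
              (pvPick 0 (pvWtoks (pvSplitDot [] (text.toList.map pvSub)))))) := by
    unfold find_proper_nouns
    simp only [replace_eq, splitOn_eq]
    rw [outerA_eq _ _ _ hfree]
    simp
  have hTok : pvTok text.toList [] true = pvWtoks (pvSplitDot [] (text.toList.map pvSub)) := by
    rw [tok_eq_wtoks, hS]
    simp [pvWtoks]
  have hB : find_proper_nouns_alt text =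
      (if pvPick 0 (pvWtoks (pvSplitDot [] (text.toList.map pvSub))) = [] then "None"
       else String.mk (PySem.Chars.join ['\n']
              (pvPick 0 (pvWtoks (pvSplitDot [] (text.toList.map pvSub)))))) := by
    rw [altB_endOut, machineB_eq, hTok]
    simp
  rw [hA, hB]
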